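-- pv_equiv track=rewrite | github.com/xinga1516/chasing | detection/DBSCAN.py | merge_sets_with_intersection
-- ===== SOURCE A (Python) =====
-- def merge_sets_with_intersection(sets_list):
--     merged_sets = []
--     merged = True
--
--     while merged:
--         merged = False
--         new_sets_list = []
--         merged_list = [0 for i in range(len(sets_list))]
--
--         for i in range(len(sets_list)):
--             for j in range(i + 1, len(sets_list)):
--                 if sets_list[i].intersection(sets_list[j]):
--                     merged_set = sets_list[i].union(sets_list[j])
--                     new_sets_list.append(merged_set)
--                     merged_list[i]=1
--                     merged_list[j]=1
--                     merged = True
--                     break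
--             if merged_list[i]==0:
--                 new_sets_list.append(sets_list[i])
--
--         merged_sets = new_sets_list
--         sets_list = new_sets_list
--
--     return merged_sets
-- ===== SOURCE B (Python) =====
-- def merge_sets_with_intersection(sets_list):
--     # One right-to-left sweep per pass with an element -> next-index map
--     # replaces A's O(n^2) pairwise intersection scan inside each pass.
--     while True:
--         n = len(sets_list)
--         nxt = {}          # element -> smallest index > current one containing it
--         f = []            # f[i] = first index j > i whose set intersects sets_list[i]
--         for i in range(n - 1, -1, -1):
--             s = sets_list[i]
--             f.append(min((nxt[x] for x in s if x in nxt), default=None))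
--             for x in s:
--                 nxt[x] = i
--         f.reverse()
--         if all(v is None for v in f):
--             return sets_list
--         targets = set(v for v in f if v is not None)
--         sets_list = [sets_list[i] if f[i] is None else sets_list[i] | sets_list[f[i]]
--                      for i in range(n) if f[i] is not None or i not in targets]
-- ===== Notes on version B (the rewrite author's own statement) =====
-- stated objective: faster
-- what changed: Each pass's O(n^2) pairwise set-intersection scan is replaced by a single right-to-left sweep with an element->next-index dictionary that yields every set's first intersecting successor, plus a comprehension that rebuilds the list in one go.
import Mathlib
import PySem

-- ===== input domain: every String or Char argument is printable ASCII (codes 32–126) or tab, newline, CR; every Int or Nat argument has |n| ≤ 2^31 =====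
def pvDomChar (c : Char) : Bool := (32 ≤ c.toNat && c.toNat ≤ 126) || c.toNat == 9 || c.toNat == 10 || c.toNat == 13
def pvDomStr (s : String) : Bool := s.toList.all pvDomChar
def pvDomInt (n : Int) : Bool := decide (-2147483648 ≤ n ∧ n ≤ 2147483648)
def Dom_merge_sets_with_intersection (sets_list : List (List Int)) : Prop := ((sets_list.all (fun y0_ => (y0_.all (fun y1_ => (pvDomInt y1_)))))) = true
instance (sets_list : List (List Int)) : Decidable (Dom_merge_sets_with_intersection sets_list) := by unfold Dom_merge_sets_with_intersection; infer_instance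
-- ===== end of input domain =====

-- B replaces A's per-element O(n^2) pairwise-intersection scan inside each pass by one
-- right-to-left sweep with an element -> next-index dictionary (objective: faster).

-- ===== PORT A =====
-- inner 'for j in range(i+1, len(sets_list)) ... break' loop: first j whose set intersects set i
def pvFirstJ (L : List (List Int)) (i j : Nat) : Option Nat :=
  if h : j < L.length then
    if !(PySem.Set.inter (L.getD i []) (L.getD j [])).isEmpty then some j
    else pvFirstJ L i (j + 1)
  else none
termination_by L.length - j

-- one iteration of A's 'while merged' body: returns (new_sets_list, merged)
def pvPassA (L : List (List Int)) : List (List Int) × Bool :=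
  let st := (List.range L.length).foldl
    (fun (st : List (List Int) × List Nat × Bool) i =>
      let st2 := match pvFirstJ L i (i + 1) with
        | some j => (st.1 ++ [PySem.Set.union (L.getD i []) (L.getD j [])],
                     (st.2.1.set i 1).set j 1, true)
        | none => st
      if st2.2.1.getD i 0 == 0 then (st2.1 ++ [L.getD i []], st2.2.1, st2.2.2) else st2)
    ([], List.replicate L.length 0, false)
  (st.1, st.2.2)

-- the 'while merged' loop (fuel only makes it total: length+1 iterations always suffice,
-- since a merging pass strictly shortens the list)
def pvLoopA : Nat → List (List Int) → List (List Int)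
  | 0, L => L
  | fuel + 1, L =>
    let p := pvPassA L
    if p.2 then pvLoopA fuel p.1 else p.1

def merge_sets_with_intersection (sets_list : List (List Int)) : List (List Int) :=
  pvLoopA (sets_list.length + 1) (sets_list.map PySem.Set.ofList)

-- ===== PORT B =====
-- min((nxt[x] for x in s if x in nxt), default=None)
def pvBest (nxt : PySem.Dict Int Nat) (s : List Int) : Option Nat :=
  PySem.List.min? (s.filterMap (fun x => nxt.get? x)) (fun k => k)

-- the 'for i in range(n-1, -1, -1)' sweep: i counts down, carrying (nxt, f)
def pvScanGo (L : List (List Int)) (nxt : PySem.Dict Int Nat) (f : List (Option Nat)) :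
    Nat → PySem.Dict Int Nat × List (Option Nat)
  | 0 => (nxt, f)
  | i + 1 =>
    let s := L.getD i []
    pvScanGo L (s.foldl (fun d x => d.insert x i) nxt) (f ++ [pvBest nxt s]) i

def pvScanB (L : List (List Int)) : List (Option Nat) :=
  ((pvScanGo L PySem.Dict.empty [] L.length).2).reverse

-- the rebuilding comprehension
def pvPassB (L : List (List Int)) (f : List (Option Nat)) : List (List Int) :=
  let targets : PySem.Set Nat := PySem.Set.ofList (f.filterMap id)
  (List.range L.length).foldl
    (fun out i =>
      if (f.getD i none).isSome || !(PySem.Set.contains targets i) then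
        out ++ [match f.getD i none with
                | some j => PySem.Set.union (L.getD i []) (L.getD j [])
                | none => L.getD i []]
      else out)
    []

-- the 'while True' loop (fuel only makes it total, as for A)
def pvLoopB : Nat → List (List Int) → List (List Int)
  | 0, L => L
  | fuel + 1, L =>
    let f := pvScanB L
    if f.all (fun v => v == none) then L
    else pvLoopB fuel (pvPassB L f)

def merge_sets_with_intersection_alt (sets_list : List (List Int)) : List (List Int) :=
  pvLoopB (sets_list.length + 1) (sets_list.map PySem.Set.ofList)

-- ===== PRECONDITION & SPEC =====
def Spec_merge_sets_with_intersection (sets_list : List (List Int)) (out : List (List Int)) : Prop := out = merge_sets_with_intersection_alt sets_list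
instance (sets_list : List (List Int)) (out : List (List Int)) : Decidable (Spec_merge_sets_with_intersection sets_list out) := by unfold Spec_merge_sets_with_intersection; infer_instance

-- ===== CLAIM (what is proved, stated in full; the proofs are below) =====
def Claim_equal_merge_sets_with_intersection : Prop := ∀ (sets_list : List (List Int)), Dom_merge_sets_with_intersection sets_list → Spec_merge_sets_with_intersection sets_list (merge_sets_with_intersection sets_list)

-- ===== LEMMAS AND PROOFS =====

-- generic "first index ≥ j below n satisfying p" used to characterise both sides
def pvFindFrom (n : Nat) (p : Nat → Bool) (j : Nat) : Option Nat :=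
  if h : j < n then (if p j then some j else pvFindFrom n p (j + 1)) else none
termination_by n - j

theorem pvFindFrom_some {n : Nat} {p : Nat → Bool} {j k : Nat}
    (h : pvFindFrom n p j = some k) : j ≤ k ∧ k < n ∧ p k = true := by
  fun_induction pvFindFrom n p j with
  | case1 =>
    injection h with h2; subst h2
    exact ⟨Nat.le_refl _, by assumption, by assumption⟩
  | case2 =>
    rename_i j hj hp ih
    obtain ⟨h1, h2, h3⟩ := ih h
    exact ⟨by omega, h2, h3⟩
  | case3 => exact absurd h (by simp)

theorem pvFindFrom_prefix {n : Nat} {p : Nat → Bool} {j k : Nat}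
    (h : pvFindFrom n p j = some k) : ∀ m, j ≤ m → m < k → p m = false := by
  fun_induction pvFindFrom n p j with
  | case1 => injection h with h2; subst h2; intro m h1 h2; omega
  | case2 =>
    rename_i j hj hp ih
    intro m h1 h2
    rcases Nat.eq_or_lt_of_le h1 with rfl | hlt
    · simpa using hp
    · exact ih h m (by omega) h2
  | case3 => exact absurd h (by simp)

theorem pvFindFrom_min {n : Nat} {p : Nat → Bool} {j k : Nat}
    (h : pvFindFrom n p j = some k) : ∀ m, j ≤ m → m < n → p m = true → k ≤ m := by
  intro m hjm hm hp
  by_contra hc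
  have := pvFindFrom_prefix h m hjm (by omega)
  rw [hp] at this; simp at this

theorem pvFindFrom_none {n : Nat} {p : Nat → Bool} {j : Nat}
    (h : pvFindFrom n p j = none) : ∀ m, j ≤ m → m < n → p m = false := by
  fun_induction pvFindFrom n p j with
  | case1 => exact absurd h (by simp)
  | case2 =>
    rename_i j hj hp ih
    intro m h1 h2
    rcases Nat.eq_or_lt_of_le h1 with rfl | hlt
    · simpa using hp
    · exact ih h m (by omega) h2
  | case3 => rename_i j hj; intro m h1 h2; omega

theorem pvFindFrom_isSome {n : Nat} {p : Nat → Bool} {j m : Nat}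
    (hjm : j ≤ m) (hm : m < n) (hp : p m = true) : (pvFindFrom n p j).isSome := by
  cases hf : pvFindFrom n p j with
  | none =>
    have := pvFindFrom_none hf m hjm hm
    rw [hp] at this; simp at this
  | some k => simp

theorem pvFirstJ_eq_findFrom (L : List (List Int)) (i j : Nat) :
    pvFirstJ L i j =
      pvFindFrom L.length (fun k => !(PySem.Set.inter (L.getD i []) (L.getD k [])).isEmpty) j := by
  fun_induction pvFirstJ L i j with
  | case1 =>
    rename_i j hj hp
    rw [pvFindFrom]; simp only [hj, dif_pos]; rw [if_pos hp]
  | case2 =>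
    rename_i j hj hp ih
    rw [pvFindFrom]; simp only [hj, dif_pos]
    rw [if_neg (by simpa using hp)]; exact ih
  | case3 =>
    rename_i j hj
    rw [pvFindFrom]; simp [hj]

-- intersection nonemptiness as a shared-element statement
theorem pvInter_ne_iff (s t : List Int) :
    ((!(PySem.Set.inter s t).isEmpty) = true) ↔ ∃ x, x ∈ s ∧ x ∈ t := by
  constructor
  · intro h
    have hne : PySem.Set.inter s t ≠ [] := by
      intro hnil; rw [hnil] at h; simp at h
    rcases List.exists_mem_of_ne_nil _ hne with ⟨x, hx⟩
    exact ⟨x, (PySem.Set.mem_inter s t x).mp hx⟩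
  · rintro ⟨x, hxs, hxt⟩
    have hx : x ∈ PySem.Set.inter s t := (PySem.Set.mem_inter s t x).mpr ⟨hxs, hxt⟩
    cases hI : PySem.Set.inter s t with
    | nil => rw [hI] at hx; simp at hx
    | cons a l => simp

-- dict after a 'for x in s: nxt[x] = i' loop
theorem pvGet?_foldl_insert_const (s : List Int) (d : PySem.Dict Int Nat) (i : Nat) (y : Int) :
    (s.foldl (fun d x => d.insert x i) d).get? y = if y ∈ s then some i else d.get? y := by
  induction s generalizing d with
  | nil => simp
  | cons a t ih =>
    simp only [List.foldl_cons, ih, List.mem_cons]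
    by_cases ht : y ∈ t <;> by_cases ha : y = a <;>
      simp [ht, ha, PySem.Dict.get?_insert]

-- B's min-over-next-occurrences equals A's first intersecting j
theorem pvBest_eq (L : List (List Int)) (i : Nat) (nxt : PySem.Dict Int Nat)
    (hyp : ∀ x, nxt.get? x = pvFindFrom L.length (fun k => decide (x ∈ L.getD k [])) (i + 1)) :
    pvBest nxt (L.getD i []) = pvFirstJ L i (i + 1) := by
  rw [pvFirstJ_eq_findFrom]
  unfold pvBest
  cases hF : pvFindFrom L.length
      (fun k => !(PySem.Set.inter (L.getD i []) (L.getD k [])).isEmpty) (i + 1) with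
  | none =>
    rw [PySem.List.min?_eq_none_iff, List.filterMap_eq_nil_iff]
    intro x hx
    cases hg : nxt.get? x with
    | none => rfl
    | some k =>
      rw [hyp x] at hg
      obtain ⟨h1, h2, h3⟩ := pvFindFrom_some hg
      have hpk : (!(PySem.Set.inter (L.getD i []) (L.getD k [])).isEmpty) = true :=
        (pvInter_ne_iff _ _).mpr ⟨x, hx, by simpa using h3⟩
      have := pvFindFrom_none hF k h1 h2
      rw [hpk] at this; simp at this
  | some k =>
    obtain ⟨hk1, hk2, hk3⟩ := pvFindFrom_some hF
    obtain ⟨x0, hx0s, hx0t⟩ := (pvInter_ne_iff _ _).mp hk3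
    have hx0find := hyp x0
    have hsome : (pvFindFrom L.length (fun k => decide (x0 ∈ L.getD k [])) (i + 1)).isSome :=
      pvFindFrom_isSome hk1 hk2 (by simpa using hx0t)
    obtain ⟨k0, hk0⟩ := Option.isSome_iff_exists.mp hsome
    have hk0k : k0 ≤ k := pvFindFrom_min hk0 k hk1 hk2 (by simpa using hx0t)
    have hk0v : k0 ∈ (L.getD i []).filterMap (fun x => nxt.get? x) :=
      List.mem_filterMap.mpr ⟨x0, hx0s, by rw [hx0find, hk0]⟩
    cases hmin : PySem.List.min? ((L.getD i []).filterMap (fun x => nxt.get? x)) (fun k => k) with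
    | none =>
      rw [PySem.List.min?_eq_none_iff] at hmin
      rw [hmin] at hk0v; simp at hk0v
    | some m =>
      have hmv := PySem.List.min?_mem hmin
      obtain ⟨x, hxs, hxg⟩ := List.mem_filterMap.mp hmv
      rw [hyp x] at hxg
      obtain ⟨hm1, hm2, hm3⟩ := pvFindFrom_some hxg
      have hkm : k ≤ m := pvFindFrom_min hF m hm1 hm2
        ((pvInter_ne_iff _ _).mpr ⟨x, hxs, by simpa using hm3⟩)
      have hmk0 : m ≤ k0 := PySem.List.min?_isMin hmin k0 hk0v
      have : m = k := by omega
      rw [this]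

theorem pvScanGo_snd (L : List (List Int)) :
    ∀ (i : Nat), i ≤ L.length → ∀ (nxt : PySem.Dict Int Nat) (f : List (Option Nat)),
    (∀ x, nxt.get? x = pvFindFrom L.length (fun k => decide (x ∈ L.getD k [])) i) →
    (pvScanGo L nxt f i).2 = f ++ (List.range i).reverse.map (fun k => pvFirstJ L k (k + 1)) := by
  intro i
  induction i with
  | zero => intro _ nxt f _; simp [pvScanGo]
  | succ i ih =>
    intro hin nxt f hyp
    have hi : i < L.length := by omega
    rw [pvScanGo]
    rw [ih (by omega) _ _ ?_]
    · rw [pvBest_eq L i nxt hyp]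
      rw [List.range_succ]
      simp
    · intro x
      rw [pvGet?_foldl_insert_const]
      rw [pvFindFrom]
      simp only [hi, dif_pos]
      split
      · rename_i hx; rw [if_pos (by simpa using hx)]
      · rename_i hx; rw [if_neg (by simpa using hx)]; exact hyp x

theorem pvScanB_eq (L : List (List Int)) :
    pvScanB L = (List.range L.length).map (fun k => pvFirstJ L k (k + 1)) := by
  unfold pvScanB
  rw [pvScanGo_snd L L.length (Nat.le_refl _) _ _ ?_]
  · simp [List.map_reverse]
  · intro x
    rw [pvFindFrom]
    simp

-- what each index contributes to the new list
def pvG (L : List (List Int)) (i : Nat) : List (List Int) :=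
  match pvFirstJ L i (i + 1) with
  | some j => [PySem.Set.union (L.getD i []) (L.getD j [])]
  | none =>
    if (List.range i).any (fun i' => pvFirstJ L i' (i' + 1) == some i) then [] else [L.getD i []]

def pvMarked (L : List (List Int)) (m : Nat) : List Nat :=
  (List.range L.length).map (fun k =>
    if (decide (k < m) && (pvFirstJ L k (k + 1)).isSome) ||
       (List.range m).any (fun i' => pvFirstJ L i' (i' + 1) == some k) then 1 else 0)

theorem pvMapRange_set {α : Type} (n k : Nat) (h : Nat → α) (v : α) (hk : k < n) :
    ((List.range n).map h).set k v = (List.range n).map (fun t => if t = k then v else h t) := by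
  apply List.ext_getElem
  · simp
  · intro idx h1 h2
    simp only [List.getElem_set, List.getElem_map, List.getElem_range]
    rcases eq_or_ne idx k with rfl | hne
    · simp
    · rw [if_neg (fun h => hne h.symm), if_neg hne]

theorem pvMapRange_getD {α : Type} (n k : Nat) (h : Nat → α) (d : α) :
    ((List.range n).map h).getD k d = if k < n then h k else d := by
  rw [List.getD_eq_getElem?_getD]
  rcases Nat.lt_or_ge k n with hlt | hge
  · rw [List.getElem?_eq_getElem (by simpa using hlt)]
    simp [hlt]
  · rw [List.getElem?_eq_none (by simpa using hge)]
    simp; omega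

theorem pvFirstJ_lt {L : List (List Int)} {i j : Nat} (h : pvFirstJ L i (i + 1) = some j) :
    i < j ∧ j < L.length := by
  rw [pvFirstJ_eq_findFrom] at h
  obtain ⟨h1, h2, _⟩ := pvFindFrom_some h
  exact ⟨by omega, h2⟩

theorem pvPassA_aux (L : List (List Int)) : ∀ m, m ≤ L.length →
    (List.range m).foldl
      (fun (st : List (List Int) × List Nat × Bool) i =>
        let st2 := match pvFirstJ L i (i + 1) with
          | some j => (st.1 ++ [PySem.Set.union (L.getD i []) (L.getD j [])],
                       (st.2.1.set i 1).set j 1, true)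
          | none => st
        if st2.2.1.getD i 0 == 0 then (st2.1 ++ [L.getD i []], st2.2.1, st2.2.2) else st2)
      ([], List.replicate L.length 0, false)
    = ((List.range m).flatMap (pvG L), pvMarked L m,
       (List.range m).any (fun i => (pvFirstJ L i (i + 1)).isSome)) := by
  intro m
  induction m with
  | zero =>
    intro _
    simp only [List.range_zero, List.foldl_nil, List.flatMap_nil, List.any_nil, Prod.mk.injEq,
      true_and, and_true]
    unfold pvMarked
    apply List.ext_getElem
    · simp
    · intro idx h1 h2
      simp
  | succ m ih =>
    intro hm
    have hmn : m < L.length := by omega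
    rw [List.range_succ, List.foldl_append, ih (by omega), List.foldl_cons, List.foldl_nil,
      List.flatMap_append, List.any_append]
    simp only [List.flatMap_cons, List.flatMap_nil, List.append_nil, List.any_cons,
      List.any_nil, Bool.or_false]
    cases hF : pvFirstJ L m (m + 1) with
    | none =>
      simp only [Option.isSome_none, Bool.or_false]
      have hMk : pvMarked L (m + 1) = pvMarked L m := by
        unfold pvMarked
        apply List.map_congr_left
        intro k hk
        rw [List.range_succ, List.any_append]
        simp only [List.any_cons, List.any_nil, hF, Bool.or_false]
        have hb : ((none : Option Nat) == some k) = false := by rfl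
        rw [hb, Bool.or_false]
        by_cases hkm : k = m
        · subst hkm
          rw [hF]
          simp
        · have hdec : decide (k < m + 1) = decide (k < m) := by
            by_cases h1 : k < m
            · simp [h1, Nat.lt_succ_of_lt h1]
            · have h2 : ¬ k < m + 1 := by omega
              simp [h1, h2]
          rw [hdec]
      rw [hMk]
      have hval : (pvMarked L m).getD m 0
          = if ((List.range m).any fun i' => pvFirstJ L i' (i' + 1) == some m) then 1 else 0 := by
        rw [pvMarked, pvMapRange_getD, if_pos hmn]
        simp
      rw [hval, pvG, hF]
      simp only
      by_cases hskip : ((List.range m).any fun i' => pvFirstJ L i' (i' + 1) == some m) = true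
      · rw [hskip]
        simp
      · rw [Bool.not_eq_true] at hskip
        rw [hskip]
        simp
    | some j =>
      obtain ⟨hmj, hjn⟩ := pvFirstJ_lt hF
      simp only [Option.isSome_some, Bool.or_true]
      have hval : (((pvMarked L m).set m 1).set j 1).getD m 0 = 1 := by
        rw [pvMarked, pvMapRange_set _ _ _ _ hmn, pvMapRange_set _ _ _ _ hjn, pvMapRange_getD,
          if_pos hmn]
        rw [if_neg (by omega), if_pos rfl]
      rw [hval]
      simp only [Nat.one_ne_zero, beq_iff_eq, if_false, Prod.mk.injEq]
      refine ⟨by rw [pvG, hF], ?_, by simp⟩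
      rw [pvMarked, pvMapRange_set _ _ _ _ hmn, pvMapRange_set _ _ _ _ hjn]
      conv_rhs => rw [pvMarked]
      apply List.map_congr_left
      intro k hk
      rw [List.range_succ, List.any_append]
      simp only [List.any_cons, List.any_nil, hF, Bool.or_false]
      by_cases hkj : k = j
      · subst hkj
        have hb : ((some k : Option Nat) == some k) = true := by simp
        rw [hb]
        simp
      · have hb : ((some j : Option Nat) == some k) = false := by simp [Ne.symm hkj]
        rw [hb, Bool.or_false, if_neg hkj]
        by_cases hkm : k = m
        · subst hkm
          rw [if_pos rfl, hF]
          simp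
        · rw [if_neg hkm]
          have hdec : decide (k < m + 1) = decide (k < m) := by
            by_cases h1 : k < m
            · simp [h1, Nat.lt_succ_of_lt h1]
            · have h2 : ¬ k < m + 1 := by omega
              simp [h1, h2]
          rw [hdec]

theorem pvPassA_eq (L : List (List Int)) :
    pvPassA L = ((List.range L.length).flatMap (pvG L),
                 (List.range L.length).any (fun i => (pvFirstJ L i (i + 1)).isSome)) := by
  unfold pvPassA
  rw [pvPassA_aux L L.length (Nat.le_refl _)]

theorem pvPassB_eq (L : List (List Int)) :
    pvPassB L ((List.range L.length).map (fun k => pvFirstJ L k (k + 1))) =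
      (List.range L.length).flatMap (pvG L) := by
  unfold pvPassB
  dsimp only
  apply Eq.trans
    (b := List.foldl (fun (out : List (List Int)) i => out ++ pvG L i) [] (List.range L.length))
  case h₂ =>
    rw [PySem.List.foldl_append_eq_flatMap]
    simp
  case h₁ =>
    apply PySem.List.foldl_congr_mem
    intro out i hi
    have hin : i < L.length := List.mem_range.mp hi
    rw [pvMapRange_getD, if_pos hin]
    cases hF : pvFirstJ L i (i + 1) with
    | some j =>
      rw [pvG, hF]
      simp
    | none =>
      simp only [Option.isSome_none, Bool.false_or]
      rw [pvG, hF]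
      simp only
      by_cases hc : ∃ i', i' < i ∧ pvFirstJ L i' (i' + 1) = some i
      · have hcont : PySem.Set.contains
            (PySem.Set.ofList
              (((List.range L.length).map (fun k => pvFirstJ L k (k + 1))).filterMap id)) i
            = true := by
          rw [PySem.Set.contains_iff, PySem.Set.mem_ofList, List.mem_filterMap]
          obtain ⟨i', hi1, hi2⟩ := hc
          exact ⟨some i, List.mem_map.mpr ⟨i', List.mem_range.mpr (by omega), hi2⟩, rfl⟩
        have hany : ((List.range i).any fun i' => pvFirstJ L i' (i' + 1) == some i) = true := by
          rw [List.any_eq_true]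
          obtain ⟨i', hi1, hi2⟩ := hc
          exact ⟨i', List.mem_range.mpr hi1, by simp [hi2]⟩
        rw [hcont, hany]
        simp
      · have hcont : PySem.Set.contains
            (PySem.Set.ofList
              (((List.range L.length).map (fun k => pvFirstJ L k (k + 1))).filterMap id)) i
            = false := by
          rw [← Bool.not_eq_true, PySem.Set.contains_iff, PySem.Set.mem_ofList,
            List.mem_filterMap]
          rintro ⟨o, ho, hoi⟩
          obtain ⟨i', hi', rfl⟩ := List.mem_map.mp ho
          simp only [id_eq] at hoi
          exact hc ⟨i', (pvFirstJ_lt hoi).1, hoi⟩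
        have hany : ((List.range i).any fun i' => pvFirstJ L i' (i' + 1) == some i) = false := by
          rw [← Bool.not_eq_true, List.any_eq_true]
          rintro ⟨i', hi', hbeq⟩
          exact hc ⟨i', List.mem_range.mp hi', by simpa using hbeq⟩
        rw [hcont, hany]
        simp

theorem pvNoMerge_eq (L : List (List Int))
    (h : (List.range L.length).any (fun i => (pvFirstJ L i (i + 1)).isSome) = false) :
    (List.range L.length).flatMap (pvG L) = L := by
  have hnone : ∀ i, i < L.length → pvFirstJ L i (i + 1) = none := by
    intro i hi
    have := (List.any_eq_false.mp h) i (List.mem_range.mpr hi)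
    cases hF : pvFirstJ L i (i + 1) with
    | none => rfl
    | some j => rw [hF] at this; simp at this
  have hg : ∀ i ∈ List.range L.length, pvG L i = [L.getD i []] := by
    intro i hi
    have hin := List.mem_range.mp hi
    rw [pvG, hnone i hin]
    simp only
    rw [if_neg ?_]
    intro hany
    rw [List.any_eq_true] at hany
    obtain ⟨i', hi', hbeq⟩ := hany
    have := hnone i' (by have := List.mem_range.mp hi'; omega)
    rw [this] at hbeq
    simp at hbeq
  have hsing : ∀ (r : List Nat), (∀ i ∈ r, pvG L i = [L.getD i []]) →
      r.flatMap (pvG L) = r.map (fun i => L.getD i []) := by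
    intro r
    induction r with
    | nil => intro _; rfl
    | cons a t iht =>
      intro hr
      rw [List.flatMap_cons, List.map_cons, hr a (by simp),
        iht (fun i hi => hr i (by simp [hi]))]
      rfl
  calc (List.range L.length).flatMap (pvG L)
      = (List.range L.length).map (fun i => L.getD i []) := hsing _ hg
    _ = L := by
        apply List.ext_getElem
        · simp
        · intro idx h1 h2
          simp only [List.getElem_map, List.getElem_range]
          rw [List.getD_eq_getElem?_getD, List.getElem?_eq_getElem h2]
          rfl

theorem pvAllNone_iff (L : List (List Int)) :
    (((List.range L.length).map (fun k => pvFirstJ L k (k + 1))).all (fun v => v == none)) =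
      !((List.range L.length).any (fun i => (pvFirstJ L i (i + 1)).isSome)) := by
  generalize List.range L.length = r
  induction r with
  | nil => rfl
  | cons a t ih =>
    simp only [List.map_cons, List.all_cons, List.any_cons, Bool.not_or, ih]
    cases hF : pvFirstJ L a (a + 1) <;> simp

theorem pvLoop_eq (fuel : Nat) : ∀ (L : List (List Int)), pvLoopA fuel L = pvLoopB fuel L := by
  induction fuel with
  | zero => intro L; rfl
  | succ fuel ih =>
    intro L
    simp only [pvLoopA, pvLoopB]
    rw [pvScanB_eq, pvAllNone_iff, pvPassA_eq, pvPassB_eq]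
    by_cases hm : ((List.range L.length).any fun i => (pvFirstJ L i (i + 1)).isSome) = true
    · rw [hm]
      simp only [Bool.not_true, Bool.false_eq_true, if_false]
      exact ih _
    · rw [Bool.not_eq_true] at hm
      rw [hm]
      simp only [Bool.not_false, Bool.false_eq_true, if_false, if_true]
      exact pvNoMerge_eq L hm

-- ===== VERDICT (by name: the statement is the Claim_ definition above) =====
theorem merge_sets_with_intersection_spec : Claim_equal_merge_sets_with_intersection := by
  intro sets_list _
  unfold Spec_merge_sets_with_intersection merge_sets_with_intersection merge_sets_with_intersection_alt
  exact pvLoop_eq _ _
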